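-- pv_equiv track=rewrite | github.com/ShaunLeung/DailyCoding | 2021-11-25/main.py | subLength
-- ===== SOURCE A (Python) =====
-- def subLength(string,k):
--     unique = []
--     length = 0
--     i = len(string)
--
--     while i > 0 and (len(unique) < k or string[i-1] in unique):
--         i -= 1
--         if string[i] not in unique and len(unique) < k :
--             unique.append(string[i])
--         length += 1
--
-- #    for char in reversed(string):
-- #        if len(unique) < k or char in unique:
-- #            if char not in unique:
-- #                unique.append(char)
-- #            length += 1
-- #        else:
-- #            break
--
--     return length
-- ===== SOURCE B (Python) =====
-- def subLength(string, k):
--     if k <= 0: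
--         return 0
--     n = len(string)
--     # ascending positions of the last occurrence of each distinct character
--     lasts = [j for j in range(n) if string[j] not in string[j + 1:]]
--     if len(lasts) <= k:
--         return n
--     return n - 1 - lasts[-(k + 1)]
-- ===== Notes on version B (the rewrite author's own statement) =====
-- stated objective: alternative
-- what changed: A scans the string right-to-left maintaining a growing list of seen characters and a length counter; B instead collects the ascending list of last-occurrence positions of each distinct character and computes the answer by closed-form index arithmetic on that list (len-1-lasts[-(k+1)]), with no backward scan or running state.
import Mathlib
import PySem

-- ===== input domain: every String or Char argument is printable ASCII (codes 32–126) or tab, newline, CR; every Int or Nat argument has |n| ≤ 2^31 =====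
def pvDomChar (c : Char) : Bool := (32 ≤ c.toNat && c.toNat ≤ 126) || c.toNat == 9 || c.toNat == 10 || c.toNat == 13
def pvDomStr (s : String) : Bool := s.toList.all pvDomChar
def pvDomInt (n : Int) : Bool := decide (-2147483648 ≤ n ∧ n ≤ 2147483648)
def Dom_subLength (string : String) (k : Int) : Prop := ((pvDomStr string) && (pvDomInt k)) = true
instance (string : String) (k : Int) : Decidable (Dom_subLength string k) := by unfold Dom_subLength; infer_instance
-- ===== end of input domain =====

-- B re-implements the backward scan by closed-form arithmetic on the ascending list of
-- last-occurrence positions (objective: alternative; no speed claim).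

-- ===== PORT A =====
-- A's while loop: i counts down from len(string); state (unique, length).
-- string[i-1] is always in range when read (loop guard i > 0), so getD is exact here.
def subLengthRun (s : List Char) (k : Int) (unique : List Char) (length : Int) : Nat → Int
  | 0 => length
  | j + 1 =>
    let c := s.getD j ' '
    if (unique.length : Int) < k ∨ c ∈ unique then
      subLengthRun s k (if c ∉ unique ∧ (unique.length : Int) < k then unique ++ [c] else unique)
        (length + 1) j
    else length

def subLength (string : String) (k : Int) : Int :=
  subLengthRun string.toList k [] 0 string.toList.length

-- ===== PORT B =====
-- lasts = [j for j in range(n) if string[j] not in string[j+1:]]  (single-char 'in' on a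
-- string is character membership, ported as list membership; string[j] is in range, so
-- pyGetD is exact).  lasts[-(k+1)] is in range when k < len(lasts), so .getD 0 is exact.
def subLength_alt (string : String) (k : Int) : Int :=
  if k ≤ 0 then 0
  else
    let s := string.toList
    let n : Int := (s.length : Int)
    let lasts : List Int :=
      (PySem.List.pyRange 0 n 1).filter
        (fun j => !(decide (PySem.List.pyGetD s j ' ' ∈ PySem.List.slice s (some (j + 1)) none)))
    if (lasts.length : Int) ≤ k then n
    else n - 1 - (PySem.List.pyGet? lasts (-(k + 1))).getD 0

-- ===== PRECONDITION & SPEC =====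
def Spec_subLength (string : String) (k : Int) (out : Int) : Prop := out = subLength_alt string k
instance (string : String) (k : Int) (out : Int) : Decidable (Spec_subLength string k out) := by unfold Spec_subLength; infer_instance

-- ===== CLAIM (what is proved, stated in full; the proofs are below) =====
def Claim_equal_subLength : Prop := ∀ (string : String) (k : Int), Dom_subLength string k → Spec_subLength string k (subLength string k)

-- ===== LEMMAS AND PROOFS =====

-- `rd t` = A's `unique` list after scanning the whole suffix t right-to-left.
def rd : List Char → List Char
  | [] => []
  | c :: t => if c ∈ rd t then rd t else rd t ++ [c]

theorem mem_rd (l : List Char) : ∀ x : Char, x ∈ rd l ↔ x ∈ l := by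
  induction l with
  | nil => simp [rd]
  | cons c t ih =>
    intro x
    simp only [rd]
    split_ifs with h
    · rw [ih] at h
      simp only [List.mem_cons, ih]
      constructor
      · exact Or.inr
      · rintro (rfl | hx); exacts [h, hx]
    · simp [ih, or_comm]

-- number of "last occurrence" positions in t
def lastCount : List Char → Nat
  | [] => 0
  | c :: t => lastCount t + (if c ∈ t then 0 else 1)

theorem rd_length (t : List Char) : (rd t).length = lastCount t := by
  induction t with
  | nil => rfl
  | cons c t ih =>
    simp only [rd, lastCount]
    rw [← ih]
    split_ifs with h h2 h2
    · omega
    · rw [mem_rd] at h; exact absurd h h2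
    · rw [mem_rd] at h; exact absurd h2 h
    · simp

-- distinct count of s.drop j is antitone in j
theorem lastCount_drop_succ_le (s : List Char) (j : Nat) :
    lastCount (s.drop (j + 1)) ≤ lastCount (s.drop j) := by
  by_cases h : j < s.length
  · rw [List.drop_eq_getElem_cons h, lastCount]; omega
  · rw [List.drop_eq_nil_of_le (by omega), List.drop_eq_nil_of_le (by omega)]

theorem lastCount_drop_mono (s : List Char) {i j : Nat} (h : i ≤ j) :
    lastCount (s.drop j) ≤ lastCount (s.drop i) := by
  induction j with
  | zero =>
    have : i = 0 := by omega
    simp [this]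
  | succ j ih =>
    by_cases hij : i = j + 1
    · rw [hij]
    · exact le_trans (lastCount_drop_succ_le s j) (ih (by omega))

-- A's loop computes len + (j - m), where m is the least index whose suffix has ≤ K distinct chars
theorem subLengthRun_eq (s : List Char) (k : Int) (K m : Nat) (hkK : k = (K : Int))
    (hm1 : lastCount (s.drop m) ≤ K) (hm2 : ∀ i, i < m → K < lastCount (s.drop i)) :
    ∀ j, m ≤ j → j ≤ s.length → ∀ len : Int,
      subLengthRun s k (rd (s.drop j)) len j = len + ((j - m : Nat) : Int) := by
  intro j
  induction j with
  | zero =>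
    intro hmj _ len
    simp only [subLengthRun]
    have : m = 0 := by omega
    simp [this]
  | succ j ih =>
    intro hmj hjn len
    have hjlt : j < s.length := by omega
    have hdrop : s.drop j = s[j] :: s.drop (j + 1) := List.drop_eq_getElem_cons hjlt
    have hgetD : s.getD j ' ' = s[j] := List.getD_eq_getElem s ' ' hjlt
    have hulen : (rd (s.drop (j + 1))).length = lastCount (s.drop (j + 1)) := rd_length _
    have hcnt1 : lastCount (s.drop (j + 1)) ≤ K :=
      le_trans (lastCount_drop_mono s hmj) hm1
    simp only [subLengthRun, hgetD]
    by_cases hcase : m ≤ j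
    · -- loop continues
      have hcj : lastCount (s.drop j) ≤ K := le_trans (lastCount_drop_mono s hcase) hm1
      have hcntj : lastCount (s.drop j)
          = lastCount (s.drop (j + 1)) + (if s[j] ∈ s.drop (j + 1) then 0 else 1) := by
        rw [hdrop]; rfl
      have hcond : ((rd (s.drop (j + 1))).length : Int) < k ∨ s[j] ∈ rd (s.drop (j + 1)) := by
        by_cases hmem : s[j] ∈ s.drop (j + 1)
        · exact Or.inr ((mem_rd _ _).2 hmem)
        · left
          rw [hulen, hkK]
          have : lastCount (s.drop j) = lastCount (s.drop (j + 1)) + 1 := by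
            rw [hcntj, if_neg hmem]
          omega
      rw [if_pos hcond]
      have hstate : (if s[j] ∉ rd (s.drop (j + 1)) ∧ ((rd (s.drop (j + 1))).length : Int) < k
          then rd (s.drop (j + 1)) ++ [s[j]] else rd (s.drop (j + 1))) = rd (s.drop j) := by
        rw [hdrop]
        show _ = rd (s[j] :: s.drop (j + 1))
        rw [rd]
        by_cases hmem : s[j] ∈ rd (s.drop (j + 1))
        · rw [if_neg (by tauto), if_pos hmem]
        · have hmem' : s[j] ∉ s.drop (j + 1) := fun h => hmem ((mem_rd _ _).2 h)
          have : lastCount (s.drop j) = lastCount (s.drop (j + 1)) + 1 := by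
            rw [hdrop, lastCount, if_neg hmem']
          rw [if_pos ⟨hmem, by rw [hulen, hkK]; exact_mod_cast (by omega : lastCount (s.drop (j+1)) < K)⟩,
              if_neg hmem]
      rw [hstate, ih hcase (by omega) (len + 1)]
      have : j + 1 - m = (j - m) + 1 := by omega
      rw [this]
      push_cast
      ring
    · -- loop exits: m = j + 1
      have hmeq : m = j + 1 := by omega
      have hKj : K < lastCount (s.drop j) := hm2 j (by omega)
      have hcond : ¬(((rd (s.drop (j + 1))).length : Int) < k ∨ s[j] ∈ rd (s.drop (j + 1))) := by
        rintro (hlt | hmem)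
        · rw [hulen, hkK] at hlt
          have : lastCount (s.drop j) ≤ lastCount (s.drop (j + 1)) + 1 := by
            rw [hdrop, lastCount]; split <;> omega
          omega
        · have hmem' : s[j] ∈ s.drop (j + 1) := (mem_rd _ _).1 hmem
          have : lastCount (s.drop j) = lastCount (s.drop (j + 1)) := by
            rw [hdrop, lastCount, if_pos hmem']
            omega
          omega
      rw [if_neg hcond, hmeq]
      simp


-- ascending positions of last occurrences
def lastPos (s : List Char) : List Nat :=
  (List.range s.length).filter (fun j => !(decide (s.getD j ' ' ∈ s.drop (j + 1))))

theorem lasts_eq (s : List Char) :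
    (PySem.List.pyRange 0 (s.length : Int) 1).filter
        (fun j => !(decide (PySem.List.pyGetD s j ' ' ∈ PySem.List.slice s (some (j + 1)) none)))
      = List.map (fun j : Nat => (j : Int)) (lastPos s) := by
  rw [PySem.List.pyRange_zero_nat, List.filter_map, lastPos]
  have hpred : ∀ j ∈ List.range s.length,
      ((fun j => !(decide (PySem.List.pyGetD s j ' ' ∈ PySem.List.slice s (some (j + 1)) none)))
          ∘ (fun k : Nat => (k : Int))) j
        = (fun j => !(decide (s.getD j ' ' ∈ s.drop (j + 1)))) j := by
    intro j _
    have h1 : PySem.List.pyGetD s ((j : Nat) : Int) ' ' = s.getD j ' ' := PySem.List.pyGetD_natCast s j ' '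
    have h2 : PySem.List.slice s (some ((j : Int) + 1)) none = s.drop (j + 1) := by
      have hc : ((j : Int) + 1) = ((j + 1 : Nat) : Int) := by push_cast; ring
      rw [hc, PySem.List.slice_from_natCast]
    simp only [Function.comp, h1, h2]
  rw [List.filter_congr hpred]

theorem lastCount_eq_range' (s : List Char) : ∀ (d j : Nat), j + d = s.length →
    lastCount (s.drop j)
      = ((List.range' j d).filter (fun i => !(decide (s.getD i ' ' ∈ s.drop (i + 1))))).length := by
  intro d
  induction d with
  | zero =>
    intro j hj
    rw [List.drop_eq_nil_of_le (by omega)]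
    rfl
  | succ d ih =>
    intro j hj
    have hjlt : j < s.length := by omega
    rw [List.range'_succ, List.drop_eq_getElem_cons hjlt, lastCount, List.filter_cons]
    have hgetD : s.getD j ' ' = s[j] := List.getD_eq_getElem s ' ' hjlt
    have ih' := ih (j + 1) (by omega)
    by_cases hmem : s[j] ∈ s.drop (j + 1)
    · rw [if_pos hmem, if_neg (by simp [List.getElem?_eq_getElem hjlt, hmem]), ← ih']
      omega
    · rw [if_neg hmem, if_pos (by simp [List.getElem?_eq_getElem hjlt, hmem]), List.length_cons, ← ih']

theorem filter_ge_lastPos (s : List Char) (j : Nat) (hj : j ≤ s.length) :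
    ((lastPos s).filter (fun x => decide (j ≤ x))).length = lastCount (s.drop j) := by
  rw [lastPos, List.filter_filter]
  have hsplit : List.range s.length = List.range' 0 j ++ List.range' j (s.length - j) := by
    rw [List.range_eq_range']
    have h := @List.range'_append 0 j (s.length - j) 1
    simp only [one_mul, Nat.zero_add] at h
    have hlen : j + (s.length - j) = s.length := by omega
    conv_lhs => rw [← hlen]
    exact h.symm
  rw [hsplit, List.filter_append, List.length_append]
  have h1 : (List.range' 0 j).filter
      (fun a => decide (j ≤ a) && !decide (s.getD a ' ' ∈ s.drop (a + 1))) = [] := by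
    rw [List.filter_eq_nil_iff]
    intro a ha
    have haj : a < j := by
      have := List.mem_range'.1 ha
      omega
    simp [show ¬ j ≤ a by omega]
  have h2 : (List.range' j (s.length - j)).filter
        (fun a => decide (j ≤ a) && !decide (s.getD a ' ' ∈ s.drop (a + 1)))
      = (List.range' j (s.length - j)).filter (fun a => !decide (s.getD a ' ' ∈ s.drop (a + 1))) := by
    apply List.filter_congr
    intro a ha
    have hja : j ≤ a := by
      have := List.mem_range'.1 ha
      omega
    simp [hja]
  rw [h1, h2, lastCount_eq_range' s (s.length - j) j (by omega)]
  simp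

theorem filterlen_ge (L : List Nat) (hL : L.Pairwise (· < ·)) :
    ∀ (i : Nat), i < L.length → ∀ v : Nat, L[i]? = some v →
      (L.filter (fun x => decide (v ≤ x))).length = L.length - i := by
  induction L with
  | nil => intro i hi; simp at hi
  | cons a t ih =>
    rcases List.pairwise_cons.1 hL with ⟨ha, ht⟩
    intro i hi v hv
    cases i with
    | zero =>
      simp only [List.getElem?_cons_zero, Option.some_inj] at hv
      subst hv
      simp only [List.filter_cons]
      rw [if_pos (by simp), List.filter_eq_self.2 (fun x hx => by simp; exact le_of_lt (ha x hx))]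
      simp
    | succ i =>
      have hi' : i < t.length := by simpa using hi
      simp only [List.getElem?_cons_succ] at hv
      have hvt : v ∈ t := List.mem_of_getElem? hv
      have hlt : a < v := ha _ hvt
      simp only [List.filter_cons]
      rw [if_neg (by simp; omega), ih ht i hi' v hv]
      simp only [List.length_cons]
      omega

theorem filterlen_gt (L : List Nat) (hL : L.Pairwise (· < ·)) :
    ∀ (i : Nat), i < L.length → ∀ v : Nat, L[i]? = some v →
      (L.filter (fun x => decide (v < x))).length = L.length - i - 1 := by
  induction L with
  | nil => intro i hi; simp at hi
  | cons a t ih =>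
    rcases List.pairwise_cons.1 hL with ⟨ha, ht⟩
    intro i hi v hv
    cases i with
    | zero =>
      simp only [List.getElem?_cons_zero, Option.some_inj] at hv
      subst hv
      simp only [List.filter_cons]
      rw [if_neg (by simp), List.filter_eq_self.2 (fun x hx => by simp; exact ha x hx)]
      simp
    | succ i =>
      have hi' : i < t.length := by simpa using hi
      simp only [List.getElem?_cons_succ] at hv
      have hvt : v ∈ t := List.mem_of_getElem? hv
      have hlt : a < v := ha _ hvt
      simp only [List.filter_cons]
      rw [if_neg (by simp; omega), ih ht i hi' v hv]
      simp only [List.length_cons]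
      omega

-- ===== VERDICT (by name: the statement is the Claim_ definition above) =====
theorem subLength_spec : Claim_equal_subLength := by
  intro string k _
  unfold Spec_subLength subLength subLength_alt
  set s := string.toList with hs
  by_cases hk : k ≤ 0
  · rw [if_pos hk]
    cases hn : s.length with
    | zero => simp [subLengthRun]
    | succ j =>
      simp only [subLengthRun]
      rw [if_neg (by simp; omega)]
  · rw [if_neg hk]
    replace hk : 0 < k := by omega
    have hkK : k = (k.toNat : Int) := (Int.toNat_of_nonneg (le_of_lt hk)).symm
    set K := k.toNat with hKdef
    have hK1 : 1 ≤ K := by omega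
    set n := s.length with hn
    set L := lastPos s with hL
    have hLpair : L.Pairwise (· < ·) :=
      List.Pairwise.sublist List.filter_sublist List.pairwise_lt_range
    have hmemL : ∀ x ∈ L, x < n := fun x hx =>
      List.mem_range.1 (List.mem_of_mem_filter hx)
    have hrd : rd (s.drop n) = [] := by rw [List.drop_length]; rfl
    simp only [lasts_eq s, List.length_map]
    by_cases hbig : ((L.length : Int) ≤ k)
    · rw [if_pos hbig]
      have hm1 : lastCount (s.drop 0) ≤ K := by
        rw [← filter_ge_lastPos s 0 (by omega)]
        have : L.filter (fun x => decide (0 ≤ x)) = L := List.filter_eq_self.2 (by simp)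
        rw [this]
        omega
      have hA := subLengthRun_eq s k K 0 hkK hm1 (by omega) n (by omega) (le_refl n) 0
      rw [hrd] at hA
      rw [hA]
      simp
      exact hn
    · rw [if_neg hbig]
      set t := L.length with ht
      have hti : K < t := by omega
      set i := t - K - 1 with hi
      have hilt : i < t := by omega
      obtain ⟨v, hv⟩ : ∃ v, L[i]? = some v := ⟨L[i]'hilt, List.getElem?_eq_getElem hilt⟩
      have hvn : v < n := hmemL _ (List.mem_of_getElem? hv)
      have hm1 : lastCount (s.drop (v + 1)) ≤ K := by
        rw [← filter_ge_lastPos s (v + 1) (by omega)]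
        have hcg : L.filter (fun x => decide (v + 1 ≤ x)) = L.filter (fun x => decide (v < x)) :=
          List.filter_congr (fun x _ => decide_eq_decide.mpr ⟨fun h => h, fun h => h⟩)
        rw [hcg, filterlen_gt L hLpair i hilt v hv]
        omega
      have hm2 : ∀ i', i' < v + 1 → K < lastCount (s.drop i') := by
        intro i' hi'
        have hmono : lastCount (s.drop v) ≤ lastCount (s.drop i') :=
          lastCount_drop_mono s (by omega)
        have hcv : lastCount (s.drop v) = t - i := by
          rw [← filter_ge_lastPos s v (by omega), filterlen_ge L hLpair i hilt v hv]
        omega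
      have hA := subLengthRun_eq s k K (v + 1) hkK hm1 hm2 n (by omega) (le_refl n) 0
      rw [hrd] at hA
      rw [hA]
      have hneg : -(k + 1) = -(((K + 1 : Nat) : Int)) := by
        rw [hkK]; push_cast; ring
      have hget : PySem.List.pyGet? (List.map (fun j : Nat => (j : Int)) L) (-(k + 1))
          = some (v : Int) := by
        rw [hneg, PySem.List.pyGet?_neg_natCast _ (K + 1) (by omega) (by simp; omega)]
        simp only [List.length_map, List.getElem?_map]
        have : t - (K + 1) = i := by omega
        rw [this, hv]
        rfl
      rw [hget]
      simp only [Option.getD_some]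
      push_cast [Nat.sub_add_eq]
      omega
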